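-- pv_equiv track=rewrite | github.com/maogongfei-dot/rentalai-backend | rental_app/weak_clause_detector.py | find_blocks_by_keywords
-- ===== SOURCE A (Python) =====
-- def _block_text_normalized(block: dict) -> str:
--     """将 block 的 text 与 section_title 合并为小写字符串便于匹配。"""
--     if not block or not isinstance(block, dict):
--         return ""
--     t = (block.get("text") or "").strip()
--     s = (block.get("section_title") or "").strip()
--     return " ".join([t, s]).lower()
--
-- def find_blocks_by_keywords(clause_blocks: list[dict], keywords: list[str]) -> list[dict]:
--     """
--     返回 clause_blocks 中 text 或 section_title 包含任一 keyword 的 block 列表（不区分大小写）。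
--     """
--     if not clause_blocks or not keywords:
--         return []
--     out = []
--     for b in clause_blocks:
--         if not isinstance(b, dict):
--             continue
--         combined = _block_text_normalized(b)
--         if not combined:
--             continue
--         for kw in keywords:
--             if kw and kw.strip() and kw.lower() in combined:
--                 out.append(b)
--                 break
--     return out
-- ===== SOURCE B (Python) =====
-- def _block_text_normalized(block: dict) -> str:
--     if not block or not isinstance(block, dict):
--         return ""
--     t = (block.get("text") or "").strip()
--     s = (block.get("section_title") or "").strip()
--     return " ".join([t, s]).lower()
--
-- def find_blocks_by_keywords(clause_blocks: list[dict], keywords: list[str]) -> list[dict]: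
--     # Staged, keyword-outer algorithm: (1) normalize blocks once into a
--     # candidate table, (2) sweep the KEYWORDS in the outer loop, marking a
--     # boolean flag per candidate, (3) emit the flagged blocks in order.
--     kws = [kw.lower() for kw in (keywords or []) if kw and kw.strip()]
--     cands = [(b, c) for b in (clause_blocks or []) if isinstance(b, dict)
--              for c in [_block_text_normalized(b)] if c]
--     flags = [False] * len(cands)
--     for kw in kws:
--         flags = [f or (kw in c) for f, (_, c) in zip(flags, cands)]
--     return [b for (b, _), f in zip(cands, flags) if f]
-- ===== Notes on version B (the rewrite author's own statement) =====
-- stated objective: alternative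
-- what changed: B inverts the loop nesting: it normalizes the blocks once into a candidate table, then sweeps the keywords in the OUTER loop maintaining a per-block boolean flag array (no per-block inner keyword scan with break), and finally emits the flagged blocks in order.
import Mathlib
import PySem

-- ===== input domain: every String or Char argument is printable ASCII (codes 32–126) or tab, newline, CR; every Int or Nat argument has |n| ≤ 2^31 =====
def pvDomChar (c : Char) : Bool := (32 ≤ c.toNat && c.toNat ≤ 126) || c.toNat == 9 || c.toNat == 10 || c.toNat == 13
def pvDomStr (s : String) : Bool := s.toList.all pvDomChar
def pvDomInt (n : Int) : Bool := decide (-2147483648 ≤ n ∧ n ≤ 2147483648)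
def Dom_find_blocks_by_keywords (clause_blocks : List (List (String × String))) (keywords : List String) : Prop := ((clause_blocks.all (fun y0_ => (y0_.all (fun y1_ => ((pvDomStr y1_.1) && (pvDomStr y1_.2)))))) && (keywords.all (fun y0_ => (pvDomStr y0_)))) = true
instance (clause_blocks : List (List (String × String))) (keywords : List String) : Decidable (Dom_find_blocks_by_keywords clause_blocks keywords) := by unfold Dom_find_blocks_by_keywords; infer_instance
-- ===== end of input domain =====

-- B inverts the loop nesting: blocks are normalized once into a candidate table,
-- the keywords are swept in the OUTER loop maintaining a boolean flag per block,
-- and the flagged blocks are emitted in order (alternative algorithm, same cost).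

-- ===== PORT A =====
-- helper _block_text_normalized (shared source helper, ported once; both ports call it)
def pvBlockNorm (b : List (String × String)) : String :=
  if b = [] then ""
  else
    let t := PySem.Str.strip (((PySem.Dict.mk b).get? "text").getD "")
    let s := PySem.Str.strip (((PySem.Dict.mk b).get? "section_title").getD "")
    PySem.Str.lower (PySem.Str.join " " [t, s])

-- A's inner 'for kw in keywords: … break' loop
def pvInnerA (combined : String) : List String → Bool
  | [] => false
  | kw :: rest =>
    if (kw != "" && PySem.Str.strip kw != "") && PySem.Str.isIn (PySem.Str.lower kw) combined
    then true
    else pvInnerA combined rest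

def find_blocks_by_keywords (clause_blocks : List (List (String × String))) (keywords : List String) : List (List (String × String)) :=
  if clause_blocks = [] ∨ keywords = [] then []
  else
    clause_blocks.foldl (fun out b =>
      let combined := pvBlockNorm b
      if combined = "" then out
      else if pvInnerA combined keywords then out ++ [b] else out) []

-- ===== PORT B =====
-- stage 1: normalized non-blank keywords
def pvKws (keywords : List String) : List String :=
  (keywords.filter (fun kw => kw != "" && PySem.Str.strip kw != "")).map PySem.Str.lower

-- stage 2: candidate table (block, combined) with non-empty combined
def pvCands (clause_blocks : List (List (String × String))) : List ((List (String × String)) × String) :=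
  ((clause_blocks.map (fun b => (b, pvBlockNorm b))).filter (fun p => p.2 != ""))

def find_blocks_by_keywords_alt (clause_blocks : List (List (String × String))) (keywords : List String) : List (List (String × String)) :=
  let kws := pvKws keywords
  let cands := pvCands clause_blocks
  let flags := kws.foldl
    (fun fl kw => (fl.zip cands).map (fun p => p.1 || PySem.Str.isIn kw p.2.2))
    (cands.map (fun _ => false))
  ((cands.zip flags).filter (fun p => p.2)).map (fun p => p.1.1)

-- ===== PRECONDITION & SPEC =====
def Spec_find_blocks_by_keywords (clause_blocks : List (List (String × String))) (keywords : List String) (out : List (List (String × String))) : Prop := out = find_blocks_by_keywords_alt clause_blocks keywords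
instance (clause_blocks : List (List (String × String))) (keywords : List String) (out : List (List (String × String))) : Decidable (Spec_find_blocks_by_keywords clause_blocks keywords out) := by unfold Spec_find_blocks_by_keywords; infer_instance

-- ===== CLAIM =====
def Claim_equal_find_blocks_by_keywords : Prop := ∀ (clause_blocks : List (List (String × String))) (keywords : List String), Dom_find_blocks_by_keywords clause_blocks keywords → Spec_find_blocks_by_keywords clause_blocks keywords (find_blocks_by_keywords clause_blocks keywords)

-- ===== LEMMAS AND PROOFS =====

-- A's inner break loop decides 'some normalized keyword occurs in combined'
theorem pvInnerA_eq_any (combined : String) (kws : List String) :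
    pvInnerA combined kws = (pvKws kws).any (fun k => PySem.Str.isIn k combined) := by
  induction kws with
  | nil => simp [pvInnerA, pvKws]
  | cons kw rest ih =>
    simp only [pvInnerA]
    by_cases h : (kw != "" && PySem.Str.strip kw != "") = true
    · have hk : pvKws (kw :: rest) = PySem.Str.lower kw :: pvKws rest := by
        simp [pvKws, h]
      rw [hk, List.any_cons, h, Bool.true_and, ih]
      by_cases h2 : PySem.Str.isIn (PySem.Str.lower kw) combined = true
      · rw [if_pos h2, h2, Bool.true_or]
      · rw [if_neg h2, Bool.eq_false_iff.mpr h2, Bool.false_or]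
    · have hk : pvKws (kw :: rest) = pvKws rest := by
        simp only [pvKws, List.filter_cons]
        rw [Bool.eq_false_iff.mpr h]; simp
      rw [hk, Bool.eq_false_iff.mpr h, Bool.false_and, if_neg (by simp), ih]

-- A's foldl accumulates exactly filter-by-any
theorem pvFoldl_eq_filter (kws : List String) (cbs : List (List (String × String))) (acc : List (List (String × String))) :
    cbs.foldl (fun out b =>
      let combined := pvBlockNorm b
      if combined = "" then out
      else if pvInnerA combined kws then out ++ [b] else out) acc
    = acc ++ cbs.filter (fun b =>
        pvBlockNorm b != "" && (pvKws kws).any (fun k => PySem.Str.isIn k (pvBlockNorm b))) := by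
  induction cbs generalizing acc with
  | nil => simp
  | cons b rest ih =>
    simp only [List.foldl_cons, List.filter_cons]
    by_cases h : pvBlockNorm b = ""
    · simp [h, ih]
    · simp only [ih]
      simp [h, pvInnerA_eq_any]
      split_ifs with hP
      · simp
      · rfl

-- pointwise update of a flag list written as 'map g cs' via zip
theorem pvZipMapStep {α : Type} (cs : List α) (g : α → Bool) (h : α → Bool) :
    ((cs.map g).zip cs).map (fun p => p.1 || h p.2) = cs.map (fun c => g c || h c) := by
  induction cs with
  | nil => rfl
  | cons c rest ih => simp [ih]

-- the keyword-outer fold computes, per candidate, 'some keyword occurs'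
theorem pvFlagsFold {α : Type} (kws : List String) (cs : List (α × String)) (g : α × String → Bool) :
    kws.foldl (fun fl kw => (fl.zip cs).map (fun p => p.1 || PySem.Str.isIn kw p.2.2)) (cs.map g)
    = cs.map (fun c => g c || kws.any (fun k => PySem.Str.isIn k c.2)) := by
  induction kws generalizing g with
  | nil => simp
  | cons kw rest ih =>
    simp only [List.foldl_cons]
    rw [show (fun (p : Bool × (α × String)) => p.1 || PySem.Str.isIn kw p.2.2)
          = (fun (p : Bool × (α × String)) => p.1 || (fun c : α × String => PySem.Str.isIn kw c.2) p.2) from rfl,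
        pvZipMapStep cs g (fun c => PySem.Str.isIn kw c.2), ih]
    congr 1; funext c
    simp [Bool.or_assoc]

-- selecting by a flag list of shape 'map g cs' is filtering by g
theorem pvZipSelect {α β : Type} (cs : List α) (g : α → Bool) (f : α → β) :
    ((cs.zip (cs.map g)).filter (fun p => p.2)).map (fun p => f p.1) = (cs.filter g).map f := by
  induction cs with
  | nil => rfl
  | cons c rest ih =>
    by_cases h : g c
    · simp [List.filter_cons, h, ih]
    · simp [Bool.eq_false_iff.mpr h, ih]

-- B's staged pipeline equals the one-pass filter
theorem pvAlt_eq_filter (cbs : List (List (String × String))) (kws : List String) :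
    find_blocks_by_keywords_alt cbs kws
    = cbs.filter (fun b =>
        pvBlockNorm b != "" && (pvKws kws).any (fun k => PySem.Str.isIn k (pvBlockNorm b))) := by
  show (((pvCands cbs).zip ((pvKws kws).foldl
      (fun fl kw => (fl.zip (pvCands cbs)).map (fun p => p.1 || PySem.Str.isIn kw p.2.2))
      ((pvCands cbs).map (fun _ => false)))).filter (fun p => p.2)).map (fun p => p.1.1) = _
  rw [show (fun (_ : (List (String × String)) × String) => false) = (fun c => (fun _ => false) c) from rfl]
  rw [pvFlagsFold, pvZipSelect]
  unfold pvCands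
  rw [List.filter_map, List.filter_map, List.map_map, List.filter_filter]
  simp [Function.comp_def, Bool.and_comm]

-- ===== VERDICT =====
theorem find_blocks_by_keywords_spec : Claim_equal_find_blocks_by_keywords := by
  intro cbs kws _
  show find_blocks_by_keywords cbs kws = find_blocks_by_keywords_alt cbs kws
  rw [pvAlt_eq_filter]
  unfold find_blocks_by_keywords
  by_cases h : cbs = [] ∨ kws = []
  · rcases h with h | h
    · simp [h]
    · simp [h, pvKws]
  · simp only [h, if_false]
    rw [pvFoldl_eq_filter]; simp
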